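-- pv_equiv track=rewrite | github.com/MehdiDinari/homebook | app/api/v1/search.py | _role_tag
-- ===== SOURCE A (Python) =====
-- def _role_tag(roles: list[str] | None) -> str | None:
--     parsed = {str(x).strip().lower() for x in (roles or []) if str(x).strip()}
--     if "administrator" in parsed:
--         return "admin"
--     if parsed.intersection({"prof", "teacher", "instructor"}):
--         return "prof"
--     if "student" in parsed:
--         return "student"
--     return None
-- ===== SOURCE B (Python) =====
-- _RANK = {"administrator": 0, "prof": 1, "teacher": 1, "instructor": 1, "student": 2}
-- _TAGS = ("admin", "prof", "student")
--
--
-- def _role_tag(roles):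
--     ranks = [_RANK.get(str(x).strip().lower(), 3) for x in (roles or [])]
--     best = min([3] + ranks)
--     return _TAGS[best] if best < 3 else None
-- ===== Notes on version B (the rewrite author's own statement) =====
-- stated objective: alternative
-- what changed: Replaces the set comprehension plus three membership/intersection priority tests with a rank minimization: each token is mapped through a priority-rank table, the minimum rank is taken, and the result tag is read from an indexed tag table.
import Mathlib
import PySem

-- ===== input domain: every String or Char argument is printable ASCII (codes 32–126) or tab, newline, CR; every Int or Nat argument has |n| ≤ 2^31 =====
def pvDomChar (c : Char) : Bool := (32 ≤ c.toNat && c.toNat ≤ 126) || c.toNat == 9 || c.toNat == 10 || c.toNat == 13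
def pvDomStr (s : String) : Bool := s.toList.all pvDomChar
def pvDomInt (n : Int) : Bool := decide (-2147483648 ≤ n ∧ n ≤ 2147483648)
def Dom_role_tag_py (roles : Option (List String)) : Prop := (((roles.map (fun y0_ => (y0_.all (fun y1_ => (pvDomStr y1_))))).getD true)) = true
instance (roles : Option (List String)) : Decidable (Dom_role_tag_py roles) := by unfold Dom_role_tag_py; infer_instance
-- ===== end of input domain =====

-- B replaces the set comprehension and the three membership/intersection tests by a rank
-- minimization: map each token to a numeric priority rank, take the minimum, index a tag table
-- (alternative algorithm, same O(n) cost).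


-- ===== PORT A =====
def role_tag_py (roles : Option (List String)) : Option String :=
  let parsed : PySem.Set String :=
    PySem.Set.ofList (((roles.getD []).filter (fun x => PySem.Str.strip x ≠ "")).map
      (fun x => PySem.Str.lower (PySem.Str.strip x)))
  if PySem.Set.contains parsed "administrator" then some "admin"
  else if PySem.Set.inter parsed (PySem.Set.ofList ["prof", "teacher", "instructor"]) ≠ [] then some "prof"
  else if PySem.Set.contains parsed "student" then some "student"
  else none

-- ===== PORT B =====
-- module constant _RANK (a Python dict literal)
def pvRankTable : PySem.Dict String Int :=
  PySem.Dict.ofList [("administrator", 0), ("prof", 1), ("teacher", 1), ("instructor", 1), ("student", 2)]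

def role_tag_py_alt (roles : Option (List String)) : Option String :=
  let ranks : List Int :=
    (roles.getD []).map (fun x => PySem.Dict.getD pvRankTable (PySem.Str.lower (PySem.Str.strip x)) 3)
  -- min([3] + ranks): Python's min of a (nonempty) list; minD's default is never reached
  let best : Int := PySem.List.minD ((3 : Int) :: ranks) id 3
  if best < 3 then PySem.List.pyGet? ["admin", "prof", "student"] best else none

-- ===== PRECONDITION & SPEC =====
def Spec_role_tag_py (roles : Option (List String)) (out : Option String) : Prop := out = role_tag_py_alt roles
instance (roles : Option (List String)) (out : Option String) : Decidable (Spec_role_tag_py roles out) := by unfold Spec_role_tag_py; infer_instance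

-- ===== CLAIM (what is proved, stated in full; the proofs are below) =====
def Claim_equal_role_tag_py : Prop := ∀ (roles : Option (List String)), Dom_role_tag_py roles → Spec_role_tag_py roles (role_tag_py roles)

-- ===== LEMMAS AND PROOFS =====

-- normalized token (str(x).strip().lower())
def pvNorm (x : String) : String := PySem.Str.lower (PySem.Str.strip x)

def pvRankOf (s : String) : Int := PySem.Dict.getD pvRankTable s 3

-- the rank table as an if-chain
theorem pv_rank (s : String) : pvRankOf s =
    (if s = "administrator" then 0
     else if s = "prof" ∨ s = "teacher" ∨ s = "instructor" then 1
     else if s = "student" then 2 else 3) := by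
  have h : pvRankTable = PySem.Dict.mk [("administrator", 0), ("prof", 1), ("teacher", 1), ("instructor", 1), ("student", 2)] := by rfl
  have he : ({ items := [] } : PySem.Dict String Int).get? s = none := rfl
  rw [pvRankOf, h, PySem.Dict.getD_eq_get?_getD]
  rw [PySem.Dict.get?_mk_cons, PySem.Dict.get?_mk_cons, PySem.Dict.get?_mk_cons, PySem.Dict.get?_mk_cons, PySem.Dict.get?_mk_cons]
  simp only [beq_iff_eq, he]
  split_ifs <;> first
    | rfl
    | simp_all [eq_comm]

theorem pv_rank_cases (s : String) :
    pvRankOf s = 0 ∨ pvRankOf s = 1 ∨ pvRankOf s = 2 ∨ pvRankOf s = 3 := by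
  rw [pv_rank]; split_ifs <;> simp

-- Python's min scanned from a first element m is a foldl min
theorem pv_min_go (l : List Int) (m : Int) : PySem.List.min? (m :: l) id = some (l.foldl min m) := by
  induction l generalizing m with
  | nil => rfl
  | cons x l ih =>
    have h1 : PySem.List.min? (m :: x :: l) id = PySem.List.min? (min m x :: l) id := by
      unfold PySem.List.min?
      simp only [List.foldl_cons]
      congr 1
      show (if id x < id m then some x else some m) = some (min m x)
      simp only [id]; split_ifs <;> simp only [Option.some.injEq] <;> omega
    rw [h1, ih, List.foldl_cons]

-- min([3] + ranks) = foldl min 3 ranks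
theorem pv_minD (l : List Int) : PySem.List.minD ((3 : Int) :: l) id 3 = l.foldl min 3 := by
  unfold PySem.List.minD
  rw [pv_min_go]
  rfl

theorem pv_foldl_min_le : ∀ (ms : List Int) (k b : Int),
    ms.foldl min b ≤ k ↔ b ≤ k ∨ ∃ m ∈ ms, m ≤ k
  | [], k, b => by simp
  | x :: ms, k, b => by
    rw [List.foldl_cons, pv_foldl_min_le ms k (min b x), min_le_iff]
    constructor
    · rintro (h | ⟨m, hm, hk⟩)
      · rcases h with h | h
        · exact Or.inl h
        · exact Or.inr ⟨x, List.mem_cons_self, h⟩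
      · exact Or.inr ⟨m, List.mem_cons_of_mem x hm, hk⟩
    · rintro (h | ⟨m, hm, hk⟩)
      · exact Or.inl (Or.inl h)
      · rcases List.mem_cons.mp hm with rfl | hm
        · exact Or.inl (Or.inr hk)
        · exact Or.inr ⟨m, hm, hk⟩

theorem pv_foldl_min_lb : ∀ (ms : List Int) (b : Int),
    (∀ m ∈ ms, (0:Int) ≤ m) → 0 ≤ b → 0 ≤ ms.foldl min b
  | [], b, _, hb => by simpa
  | x :: ms, b, hms, hb => by
    rw [List.foldl_cons]
    exact pv_foldl_min_lb ms (min b x)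
      (fun m hm => hms m (List.mem_cons_of_mem x hm))
      (le_min hb (hms x List.mem_cons_self))

-- pvHits s x : x's normalized form is nonempty and equals s (A-side predicate)
def pvHits (s : String) (x : String) : Bool :=
  decide (PySem.Str.strip x ≠ "") && decide (PySem.Str.lower (PySem.Str.strip x) = s)

-- membership in A's parsed set ↔ a hit
theorem pv_mem (l : List String) (s : String) :
    (s ∈ PySem.Set.ofList ((l.filter (fun x => PySem.Str.strip x ≠ "")).map
        (fun x => PySem.Str.lower (PySem.Str.strip x))))
    ↔ ∃ x ∈ l, pvHits s x = true := by
  rw [PySem.Set.mem_ofList]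
  simp only [List.mem_map, List.mem_filter, decide_eq_true_iff, pvHits, Bool.and_eq_true]
  constructor
  · rintro ⟨x, ⟨hx, hne⟩, heq⟩
    exact ⟨x, hx, hne, by simp [heq]⟩
  · rintro ⟨x, hx, hne, heq⟩
    exact ⟨x, ⟨hx, by simpa using hne⟩, by simpa using heq⟩

-- A's intersection is nonempty ↔ a prof-group hit
theorem pv_inter (l : List String) :
    (PySem.Set.inter
        (PySem.Set.ofList ((l.filter (fun x => PySem.Str.strip x ≠ "")).map
          (fun x => PySem.Str.lower (PySem.Str.strip x))))
        (PySem.Set.ofList ["prof", "teacher", "instructor"]) ≠ [])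
    ↔ ∃ x ∈ l, (pvHits "prof" x || pvHits "teacher" x || pvHits "instructor" x) = true := by
  rw [← List.isEmpty_eq_false_iff, List.isEmpty_eq_false_iff_exists_mem]
  constructor
  · rintro ⟨y, hy⟩
    obtain ⟨h1, h2⟩ := (PySem.Set.mem_inter _ _ _).mp hy
    obtain ⟨x, hx, hh⟩ := (pv_mem l y).mp h1
    refine ⟨x, hx, ?_⟩
    simp only [PySem.Set.mem_ofList, List.mem_cons, List.not_mem_nil, or_false] at h2
    rcases h2 with h | h | h <;> simp [h ▸ hh]
  · rintro ⟨x, hx, hh⟩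
    have key : ∀ s : String, pvHits s x = true → s ∈ (["prof", "teacher", "instructor"] : List String) →
        ∃ y, y ∈ PySem.Set.inter
          (PySem.Set.ofList ((l.filter (fun x => PySem.Str.strip x ≠ "")).map
            (fun x => PySem.Str.lower (PySem.Str.strip x))))
          (PySem.Set.ofList ["prof", "teacher", "instructor"]) := by
      intro s hs hmem
      refine ⟨s, (PySem.Set.mem_inter _ _ _).mpr ⟨(pv_mem l s).mpr ⟨x, hx, hs⟩, ?_⟩⟩
      simpa [PySem.Set.mem_ofList] using hmem
    simp only [Bool.or_eq_true] at hh
    rcases hh with (h | h) | h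
    · exact key _ h (by simp)
    · exact key _ h (by simp)
    · exact key _ h (by simp)

-- a nonempty normalized form forces a nonempty strip
theorem pv_strip_ne (x s : String) (h : pvNorm x = s) (hs : s ≠ "") : PySem.Str.strip x ≠ "" := by
  intro h0
  apply hs
  rw [← h]
  unfold pvNorm
  rw [h0]
  decide

-- hits ↔ rank values
theorem pv_hit0 (x : String) : pvHits "administrator" x = true ↔ pvRankOf (pvNorm x) ≤ 0 := by
  rw [pv_rank]
  constructor
  · intro h
    simp only [pvHits, Bool.and_eq_true, decide_eq_true_iff] at h
    simp [pvNorm, h.2]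
  · intro h
    split_ifs at h with h1 h2 h3 <;> try omega
    simp only [pvHits, Bool.and_eq_true, decide_eq_true_iff]
    exact ⟨pv_strip_ne x _ h1 (by decide), by simpa [pvNorm] using h1⟩

theorem pv_hit1 (x : String) :
    (pvHits "prof" x || pvHits "teacher" x || pvHits "instructor" x) = true ↔ pvRankOf (pvNorm x) = 1 := by
  rw [pv_rank]
  constructor
  · intro h
    simp only [Bool.or_eq_true, pvHits, Bool.and_eq_true, decide_eq_true_iff] at h
    have hg : pvNorm x = "prof" ∨ pvNorm x = "teacher" ∨ pvNorm x = "instructor" := by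
      rcases h with (⟨_, h⟩ | ⟨_, h⟩) | ⟨_, h⟩ <;> simp [pvNorm, h]
    have hne : ¬ pvNorm x = "administrator" := by
      rcases hg with h | h | h <;> simp [h]
    simp [hne, hg]
  · intro h
    split_ifs at h with h1 h2 h3 <;> try omega
    simp only [Bool.or_eq_true, pvHits, Bool.and_eq_true, decide_eq_true_iff]
    rcases h2 with h2 | h2 | h2
    · exact Or.inl (Or.inl ⟨pv_strip_ne x _ h2 (by decide), by simpa [pvNorm] using h2⟩)
    · exact Or.inl (Or.inr ⟨pv_strip_ne x _ h2 (by decide), by simpa [pvNorm] using h2⟩)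
    · exact Or.inr ⟨pv_strip_ne x _ h2 (by decide), by simpa [pvNorm] using h2⟩

theorem pv_hit2 (x : String) : pvHits "student" x = true ↔ pvRankOf (pvNorm x) = 2 := by
  rw [pv_rank]
  constructor
  · intro h
    simp only [pvHits, Bool.and_eq_true, decide_eq_true_iff] at h
    have hg : pvNorm x = "student" := by simp [pvNorm, h.2]
    simp [hg]
  · intro h
    split_ifs at h with h1 h2 h3 <;> try omega
    simp only [pvHits, Bool.and_eq_true, decide_eq_true_iff]
    exact ⟨pv_strip_ne x _ h3 (by decide), by simpa [pvNorm] using h3⟩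

-- ===== VERDICT (by name: the statement is the Claim_ definition above) =====
theorem role_tag_py_spec : Claim_equal_role_tag_py := by
  intro roles _
  unfold Spec_role_tag_py role_tag_py role_tag_py_alt
  have hfold : (fun x => PySem.Dict.getD pvRankTable (PySem.Str.lower (PySem.Str.strip x)) 3)
      = (fun x => pvRankOf (pvNorm x)) := rfl
  simp only [hfold, pv_minD]
  set l := roles.getD [] with hl
  set best := (l.map (fun x => pvRankOf (pvNorm x))).foldl min 3 with hbest
  have hble : ∀ k : Int, k < 3 → (best ≤ k ↔ ∃ x ∈ l, pvRankOf (pvNorm x) ≤ k) := by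
    intro k hk
    rw [hbest, pv_foldl_min_le]
    simp only [List.mem_map]
    constructor
    · rintro (h | ⟨m, ⟨x, hx, rfl⟩, hmk⟩)
      · omega
      · exact ⟨x, hx, hmk⟩
    · rintro ⟨x, hx, hxk⟩
      exact Or.inr ⟨_, ⟨x, hx, rfl⟩, hxk⟩
  have hb0 : 0 ≤ best := by
    apply pv_foldl_min_lb _ _ _ (by omega)
    rintro m hm
    simp only [List.mem_map] at hm
    obtain ⟨x, _, rfl⟩ := hm
    rcases pv_rank_cases (pvNorm x) with h | h | h | h <;> omega
  have hc0 : PySem.Set.contains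
      (PySem.Set.ofList ((l.filter (fun x => PySem.Str.strip x ≠ "")).map
        (fun x => PySem.Str.lower (PySem.Str.strip x)))) "administrator"
      = decide (∃ x ∈ l, pvRankOf (pvNorm x) ≤ 0) := by
    apply Bool.coe_iff_coe.mp
    rw [PySem.Set.contains_iff, pv_mem, decide_eq_true_iff]
    constructor
    · rintro ⟨x, hx, h⟩; exact ⟨x, hx, (pv_hit0 x).mp h⟩
    · rintro ⟨x, hx, h⟩; exact ⟨x, hx, (pv_hit0 x).mpr h⟩
  have hc2 : PySem.Set.contains
      (PySem.Set.ofList ((l.filter (fun x => PySem.Str.strip x ≠ "")).map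
        (fun x => PySem.Str.lower (PySem.Str.strip x)))) "student"
      = decide (∃ x ∈ l, pvRankOf (pvNorm x) = 2) := by
    apply Bool.coe_iff_coe.mp
    rw [PySem.Set.contains_iff, pv_mem, decide_eq_true_iff]
    constructor
    · rintro ⟨x, hx, h⟩; exact ⟨x, hx, (pv_hit2 x).mp h⟩
    · rintro ⟨x, hx, h⟩; exact ⟨x, hx, (pv_hit2 x).mpr h⟩
  have hc1 : (PySem.Set.inter
        (PySem.Set.ofList ((l.filter (fun x => PySem.Str.strip x ≠ "")).map
          (fun x => PySem.Str.lower (PySem.Str.strip x))))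
        (PySem.Set.ofList ["prof", "teacher", "instructor"]) ≠ [])
      ↔ (∃ x ∈ l, pvRankOf (pvNorm x) = 1) := by
    rw [pv_inter]
    constructor
    · rintro ⟨x, hx, h⟩; exact ⟨x, hx, (pv_hit1 x).mp h⟩
    · rintro ⟨x, hx, h⟩; exact ⟨x, hx, (pv_hit1 x).mpr h⟩
  rw [hc0, hc2]
  by_cases h0 : ∃ x ∈ l, pvRankOf (pvNorm x) ≤ 0
  · have hbe : best = 0 := le_antisymm ((hble 0 (by omega)).mpr h0) hb0
    rw [if_pos (decide_eq_true h0), hbe, if_pos (by omega : (0:Int) < 3)]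
    rfl
  · by_cases h1 : ∃ x ∈ l, pvRankOf (pvNorm x) = 1
    · have hbe : best = 1 := by
        have hle : best ≤ 1 := (hble 1 (by omega)).mpr (by
          obtain ⟨x, hx, h⟩ := h1; exact ⟨x, hx, by omega⟩)
        have hgt : ¬ best ≤ 0 := fun hc => h0 ((hble 0 (by omega)).mp hc)
        omega
      rw [if_neg (fun hc => h0 (of_decide_eq_true hc)), if_pos (hc1.mpr h1), hbe,
        if_pos (by omega : (1:Int) < 3)]
      rfl
    · by_cases h2 : ∃ x ∈ l, pvRankOf (pvNorm x) = 2
      · have hbe : best = 2 := by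
          have hle : best ≤ 2 := (hble 2 (by omega)).mpr (by
            obtain ⟨x, hx, h⟩ := h2; exact ⟨x, hx, by omega⟩)
          have hgt : ¬ best ≤ 1 := fun hc => by
            obtain ⟨x, hx, hxk⟩ := (hble 1 (by omega)).mp hc
            rcases pv_rank_cases (pvNorm x) with h | h | h | h
            · exact h0 ⟨x, hx, by omega⟩
            · exact h1 ⟨x, hx, h⟩
            · omega
            · omega
          omega
        rw [if_neg (fun hc => h0 (of_decide_eq_true hc)), if_neg (fun hc => h1 (hc1.mp hc)),
          if_pos (decide_eq_true h2), hbe, if_pos (by omega : (2:Int) < 3)]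
        rfl
      · have hbe : ¬ best < 3 := by
          intro hc
          obtain ⟨x, hx, hxk⟩ := (hble 2 (by omega)).mp (by omega)
          rcases pv_rank_cases (pvNorm x) with h | h | h | h
          · exact h0 ⟨x, hx, by omega⟩
          · exact h1 ⟨x, hx, h⟩
          · exact h2 ⟨x, hx, h⟩
          · omega
        rw [if_neg (fun hc => h0 (of_decide_eq_true hc)), if_neg (fun hc => h1 (hc1.mp hc)),
          if_neg (fun hc => h2 (of_decide_eq_true hc)), if_neg hbe]
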